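-- pv_equiv track=rewrite | github.com/KU-MIDS-MO/assignment2-introp-25-26-ramezani13 | swap_ends.py | swap_ends
-- ===== SOURCE A (Python) =====
-- def swap_ends(L, k):
--     if type(L) != list or type(k) != int:
--         return ([], 0)
--
--     n = len(L)
--     if n == 0 or k <= 0 or k > n // 2:
--         return (L.copy(), 0)
--
--     new_list = L.copy()
--     num_swaps = 0
--     i = 0
--
--
--     while i < k:
--         j = n - k + i
--         new_list[i], new_list[j] = new_list[j], new_list[i]###tuple unpaking
--         num_swaps += 1
--         i += 1
--
--     return (new_list, num_swaps)
-- ===== SOURCE B (Python) =====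
-- def swap_ends(L, k):
--     if type(L) != list or type(k) != int:
--         return ([], 0)
--
--     n = len(L)
--     if n == 0 or k <= 0 or k > n // 2:
--         return (L.copy(), 0)
--
--     # build the result directly: last-k block, untouched middle, first-k block
--     return (L[n - k:] + L[k:n - k] + L[:k], k)
-- ===== Notes on version B (the rewrite author's own statement) =====
-- stated objective: simpler
-- what changed: Replaces the explicit index-pair swap loop over a mutated copy with a direct slice reconstruction (last-k block + middle + first-k block) and num_swaps = k.
import Mathlib
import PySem

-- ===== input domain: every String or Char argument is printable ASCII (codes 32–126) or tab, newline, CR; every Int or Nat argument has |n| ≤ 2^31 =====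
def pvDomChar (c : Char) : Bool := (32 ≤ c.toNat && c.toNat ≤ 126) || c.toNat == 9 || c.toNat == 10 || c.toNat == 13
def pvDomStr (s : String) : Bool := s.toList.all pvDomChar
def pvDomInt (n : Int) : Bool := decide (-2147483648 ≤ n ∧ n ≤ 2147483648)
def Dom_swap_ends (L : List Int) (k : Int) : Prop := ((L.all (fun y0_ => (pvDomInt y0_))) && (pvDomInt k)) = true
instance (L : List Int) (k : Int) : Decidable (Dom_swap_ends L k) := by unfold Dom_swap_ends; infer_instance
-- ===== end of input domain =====

-- B replaces A's explicit index-pair swap loop with a direct slice reconstruction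
-- (last-k block ++ untouched middle ++ first-k block), num_swaps = k; objective: simpler.

-- ===== PORT A =====
-- the while-loop of A: swaps new_list[i] with new_list[j], j = n-k+i, while i < k
def swapLoopA (nl : List Int) (n k i numSwaps : Int) : List Int × Int :=
  if _h : i < k then
    -- j = n - k + i; tuple swap new_list[i], new_list[j] = new_list[j], new_list[i]
    -- (indices provably in range under A's guard, so the total forms are exact)
    swapLoopA
      (PySem.List.pySetD (PySem.List.pySetD nl i (PySem.List.pyGetD nl (n - k + i) 0))
        (n - k + i) (PySem.List.pyGetD nl i 0))
      n k (i + 1) (numSwaps + 1)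
  else (nl, numSwaps)
termination_by (k - i).toNat
decreasing_by omega

def swap_ends (L : List Int) (k : Int) : List Int × Int :=
  let n : Int := L.length
  if n = 0 ∨ k ≤ 0 ∨ k > PySem.Int.floordiv n 2 then (L, 0)
  else swapLoopA L n k 0 0

-- ===== PORT B =====
def swap_ends_alt (L : List Int) (k : Int) : List Int × Int :=
  let n : Int := L.length
  if n = 0 ∨ k ≤ 0 ∨ k > PySem.Int.floordiv n 2 then (L, 0)
  else (PySem.List.slice L (some (n - k)) none ++
        PySem.List.slice L (some k) (some (n - k)) ++
        PySem.List.slice L none (some k), k)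

-- ===== PRECONDITION & SPEC =====
def Spec_swap_ends (L : List Int) (k : Int) (out : List Int × Int) : Prop := out = swap_ends_alt L k
instance (L : List Int) (k : Int) (out : List Int × Int) : Decidable (Spec_swap_ends L k out) := by unfold Spec_swap_ends; infer_instance

-- ===== CLAIM (what is proved, stated in full; the proofs are below) =====
def Claim_equal_swap_ends : Prop := ∀ (L : List Int) (k : Int), Dom_swap_ends L k → Spec_swap_ends L k (swap_ends L k)

-- ===== LEMMAS AND PROOFS =====

lemma getElem?_set_iff (l : List Int) (i j : Nat) (a : Int) :
    (l.set i a)[j]? = if i = j ∧ i < l.length then some a else l[j]? := by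
  rw [List.getElem?_set]
  split_ifs <;> first | rfl | omega | exact (List.getElem?_eq_none (by omega)).symm

-- characterisation of A's swap loop, pointwise on indices
lemma swapLoopA_spec (N K : Nat) (hK : 2 * K ≤ N) :
    ∀ d I, I + d = K → ∀ (nl : List Int) (s : Int), nl.length = N →
      (swapLoopA nl (N : Int) (K : Int) (I : Int) s).2 = s + ((K - I : Nat) : Int) ∧
      ∀ m : Nat, (swapLoopA nl (N : Int) (K : Int) (I : Int) s).1[m]? =
        if I ≤ m ∧ m < K then nl[N - K + m]?
        else if N - K + I ≤ m ∧ m < N then nl[m - (N - K)]?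
        else nl[m]? := by
  intro d
  induction d with
  | zero =>
    intro I hI nl s hlen
    have hIK : I = K := by omega
    rw [swapLoopA, dif_neg (by omega)]
    refine ⟨by simp [hIK], fun m => ?_⟩
    split_ifs <;> first | rfl | omega
  | succ d ih =>
    intro I hI nl s hlen
    have hIl : (I : Int) < (K : Int) := by omega
    rw [swapLoopA, dif_pos hIl]
    have hj' : ((N : Int) - (K : Int) + (I : Int)) = ((N - K + I : Nat) : Int) := by omega
    have hcast : (I : Int) + 1 = ((I + 1 : Nat) : Int) := by push_cast; ring
    rw [hj', hcast, PySem.List.pyGetD_natCast, PySem.List.pyGetD_natCast,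
        PySem.List.pySetD_natCast, PySem.List.pySetD_natCast]
    set a : Int := nl.getD (N - K + I) 0 with hadef
    set b : Int := nl.getD I 0 with hbdef
    set nl' : List Int := (nl.set I a).set (N - K + I) b with hnl'
    have hlen' : nl'.length = N := by simp [hnl', hlen]
    obtain ⟨h2, h1⟩ := ih (I + 1) (by omega) nl' (s + 1) hlen'
    refine ⟨by rw [h2]; omega, fun m => ?_⟩
    rw [h1 m]
    have hval : ∀ x : Nat, nl'[x]? =
        if x = N - K + I ∧ x < N then some b else
        if x = I ∧ x < N then some a else nl[x]? := by
      intro x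
      rw [hnl', getElem?_set_iff, getElem?_set_iff]
      simp only [List.length_set, hlen]
      split_ifs <;> first | rfl | omega
    rw [hval, hval, hval]
    have hidx : ∀ x y : Nat, x = y → nl[x]? = nl[y]? := fun x y h => by rw [h]
    have hsome : ∀ x y : Nat, x = y → x < N → (some (nl.getD x 0) : Option Int) = nl[y]? := by
      intro x y hxy hx; subst hxy
      rw [List.getElem?_eq_getElem (by omega), List.getD_eq_getElem _ _ (by omega)]
    split_ifs <;>
      first
      | rfl
      | omega
      | (apply hidx; omega)
      | (exact hsome _ _ (by omega) (by omega))
      | (exact (hsome _ _ (by omega) (by omega)).symm)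

theorem swap_ends_spec : Claim_equal_swap_ends := by
  intro L k _hdom
  unfold Spec_swap_ends swap_ends swap_ends_alt
  by_cases hg : (L.length : Int) = 0 ∨ k ≤ 0 ∨ k > PySem.Int.floordiv (L.length : Int) 2
  · simp only [hg, if_pos]
  · simp only [hg, if_neg, not_false_iff]
    push_neg at hg
    obtain ⟨hn0, hkpos, hkle⟩ := hg
    rw [PySem.Int.floordiv_eq_ediv_of_pos (by norm_num)] at hkle
    obtain ⟨K, rfl⟩ : ∃ K : Nat, k = (K : Int) := ⟨k.toNat, by omega⟩
    set N : Nat := L.length with hN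
    have hK1 : 1 ≤ K := by omega
    have h2K : 2 * K ≤ N := by omega
    obtain ⟨h2, h1⟩ := swapLoopA_spec N K h2K K 0 (by omega) L 0 rfl
    simp only [Nat.cast_zero, Nat.add_zero] at h1 h2
    have hnk : (N : Int) - (K : Int) = ((N - K : Nat) : Int) := by omega
    rw [hnk, PySem.List.slice_from_natCast, PySem.List.slice_natCast, PySem.List.slice_to_natCast]
    refine Prod.ext ?_ (by simp [h2])
    apply List.ext_getElem?
    intro m
    have hL : L.length = N := hN.symm
    have hlen1 : (L.drop (N - K)).length = K := by simp [hL]; omega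
    have hlen2 : ((L.drop K).take (N - K - K)).length = N - K - K := by
      simp [hL]
    rw [h1 m]
    simp only [List.getElem?_append, List.getElem?_take, List.getElem?_drop,
               List.length_append, hlen1, hlen2]
    have hidx : ∀ x y : Nat, x = y → L[x]? = L[y]? := fun x y h => by rw [h]
    split_ifs <;>
      first
      | rfl
      | omega
      | (apply hidx; omega)
      | (exact (List.getElem?_eq_none (by omega)))
      | (exact (List.getElem?_eq_none (by omega)).symm)
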